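-- pv_equiv track=rewrite | github.com/unoplat/unoplat-code-confluence | unoplat-code-confluence-ingestion/code-confluence-flow-bridge/src/code_confluence_flow_bridge/engine/programming_language/python/python_framework_detection_service.py | _expand_import_paths
-- ===== SOURCE A (Python) =====
-- from typing import TYPE_CHECKING, List, Optional
--
-- def _expand_import_paths(import_paths: List[str]) -> List[str]:
--     """Expand dotted import paths into all ancestor prefixes for DB lookup.
--
--     Args:
--         import_paths: Fully-qualified dotted import paths
--             (e.g. ``["flask.blueprints.Blueprint"]``).
--
--     Returns:
--         Sorted, deduplicated list containing each original path plus every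
--         leading prefix (e.g. ``["flask", "flask.blueprints",
--         "flask.blueprints.Blueprint"]``).
--     """
--     expanded: List[str] = []
--     for path in import_paths:
--         expanded.append(path)
--         parts = path.split(".")
--         # Generate every leading prefix so the DB query can match at any depth
--         for idx in range(1, len(parts)):
--             expanded.append(".".join(parts[:idx]))
--     return sorted(set(expanded))
-- ===== SOURCE B (Python) =====
-- from typing import List
--
-- def _expand_import_paths(import_paths: List[str]) -> List[str]:
--     """Expand dotted import paths into all ancestor prefixes (sorted, deduped).
--
--     Single character scan per path with an incremental prefix accumulator:
--     every '.' marks the end of one ancestor prefix, so no split/join/slice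
--     machinery is needed and the set is built directly.
--     """
--     expanded = set()
--     for path in import_paths:
--         expanded.add(path)
--         prefix = ""
--         for ch in path:
--             if ch == ".":
--                 expanded.add(prefix)
--             prefix += ch
--     return sorted(expanded)
-- ===== Notes on version B (the rewrite author's own statement) =====
-- stated objective: simpler
-- what changed: B replaces A's split-into-parts plus repeated slice-and-join reconstruction of every prefix by a single character scan per path with an incremental prefix accumulator, adding a prefix to a set at each dot.
import Mathlib
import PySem

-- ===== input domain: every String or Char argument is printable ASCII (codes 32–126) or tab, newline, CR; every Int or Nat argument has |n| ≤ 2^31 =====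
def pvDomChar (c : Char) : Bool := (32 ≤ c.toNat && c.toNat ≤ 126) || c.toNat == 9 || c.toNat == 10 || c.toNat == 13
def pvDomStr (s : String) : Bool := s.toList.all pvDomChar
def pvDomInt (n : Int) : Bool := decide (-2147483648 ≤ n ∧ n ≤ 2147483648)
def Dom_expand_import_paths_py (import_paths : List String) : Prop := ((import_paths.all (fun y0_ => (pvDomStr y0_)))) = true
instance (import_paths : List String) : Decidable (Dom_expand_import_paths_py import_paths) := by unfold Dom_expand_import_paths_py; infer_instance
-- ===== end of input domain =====

-- B replaces A's split/slice/join prefix reconstruction by a single character scan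
-- per path with an incremental prefix accumulator (objective: simpler).


-- ===== PORT A =====
-- 'path.split(".")' is PySem.Str.split? path "."; the separator "." is never empty,
-- so split? is always 'some' and the '.getD []' default is never taken.
def expand_import_paths_py (import_paths : List String) : List String :=
  let expanded : List String := import_paths.foldl (fun expanded path =>
    let expanded := expanded ++ [path]
    let parts : List String := (PySem.Str.split? path ".").getD []
    (PySem.List.pyRange 1 (parts.length : Int) 1).foldl
      (fun expanded idx =>
        expanded ++ [PySem.Str.join "." (PySem.List.slice parts none (some idx))])
      expanded) []
  PySem.List.sorted (PySem.Set.ofList expanded) (fun x => x) false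

-- ===== PORT B =====
-- Python's growing 'prefix' string is modelled on List Char (exact: a Python str of
-- the same characters, turned into a String by String.ofList at each set-insertion).
def expand_import_paths_py_alt (import_paths : List String) : List String :=
  let expanded : PySem.Set String := import_paths.foldl (fun expanded path =>
    let expanded := PySem.Set.add expanded path
    (path.toList.foldl (fun (p : PySem.Set String × List Char) ch =>
        if ch = '.' then (PySem.Set.add p.1 (String.ofList p.2), p.2 ++ [ch])
        else (p.1, p.2 ++ [ch]))
      (expanded, [])).1) PySem.Set.empty
  PySem.List.sorted expanded (fun x => x) false

-- ===== PRECONDITION & SPEC =====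
def Spec_expand_import_paths_py (import_paths : List String) (out : List String) : Prop := out = expand_import_paths_py_alt import_paths
instance (import_paths : List String) (out : List String) : Decidable (Spec_expand_import_paths_py import_paths out) := by unfold Spec_expand_import_paths_py; infer_instance

-- ===== CLAIM (what is proved, stated in full; the proofs are below) =====
def Claim_equal_expand_import_paths_py : Prop := ∀ (import_paths : List String), Dom_expand_import_paths_py import_paths → Spec_expand_import_paths_py import_paths (expand_import_paths_py import_paths)

-- ===== LEMMAS AND PROOFS =====
def consHead (x : List Char) : List (List Char) → List (List Char)
  | [] => [x]
  | p :: ps => (x ++ p) :: ps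

def mySplit : List Char → List (List Char)
  | [] => [[]]
  | c :: rest => if c = '.' then [] :: mySplit rest else consHead [c] (mySplit rest)

theorem mySplit_ne_nil (cs : List Char) : mySplit cs ≠ [] := by
  induction cs with
  | nil => simp [mySplit]
  | cons c rest ih =>
    simp only [mySplit]
    split
    · simp
    · cases h : mySplit rest with
      | nil => exact absurd h ih
      | cons p ps => simp [consHead]

theorem consHead_nil_of_ne_nil (r : List (List Char)) (h : r ≠ []) : consHead [] r = r := by
  cases r with
  | nil => exact absurd rfl h
  | cons p ps => simp [consHead]

theorem consHead_consHead (a b : List Char) (r : List (List Char)) :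
    consHead a (consHead b r) = consHead (a ++ b) r := by
  cases r <;> simp [consHead]

theorem splitOn_go_eq (fuel : Nat) : ∀ (l cur : List Char) (out : List (List Char)),
    l.length < fuel →
    PySem.Chars.splitOn.go ['.'] fuel l cur out = out.reverse ++ consHead cur.reverse (mySplit l) := by
  induction fuel with
  | zero => intro l cur out h; omega
  | succ fuel ih =>
    intro l cur out h
    cases l with
    | nil => simp [PySem.Chars.splitOn.go, mySplit, consHead]
    | cons c rest =>
      by_cases hc : c = '.'
      · subst hc
        have hpre : List.isPrefixOf ['.'] ('.' :: rest) = true := by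
          simp [List.isPrefixOf]
        rw [PySem.Chars.splitOn.go]
        simp only [hpre, if_pos]
        rw [show List.drop ['.'].length ('.' :: rest) = rest from rfl]
        rw [ih rest [] (cur.reverse :: out) (by simp at h ⊢; omega)]
        simp only [List.reverse_nil]
        rw [consHead_nil_of_ne_nil _ (mySplit_ne_nil rest)]
        simp only [mySplit]
        cases hms : mySplit rest with
        | nil => exact absurd hms (mySplit_ne_nil rest)
        | cons p ps => simp [consHead]
      · have hpre : List.isPrefixOf ['.'] (c :: rest) = false := by
          simp [List.isPrefixOf]
          exact fun hh => absurd hh.symm hc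
        rw [PySem.Chars.splitOn.go]
        simp only [hpre]
        rw [if_neg (by simp)]
        rw [ih rest (c :: cur) out (by simp at h ⊢; omega)]
        simp only [mySplit, if_neg hc]
        rw [consHead_consHead]
        simp

theorem splitOn_eq_mySplit (cs : List Char) : PySem.Chars.splitOn cs ['.'] = mySplit cs := by
  unfold PySem.Chars.splitOn
  rw [splitOn_go_eq (cs.length + 1) cs [] [] (by omega)]
  simp only [List.reverse_nil, List.nil_append]
  exact consHead_nil_of_ne_nil _ (mySplit_ne_nil cs)

def dotPrefixes : List Char → List (List Char)
  | [] => []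
  | c :: rest => (if c = '.' then [[]] else []) ++ (dotPrefixes rest).map (c :: ·)

def joinPrefixes (acc : List Char) : List (List Char) → List (List Char)
  | [] => []
  | [_] => []
  | p :: q :: rest => (acc ++ p) :: joinPrefixes (acc ++ p ++ ['.']) (q :: rest)

theorem joinPrefixes_shift (ps : List (List Char)) : ∀ (acc b : List Char),
    joinPrefixes (acc ++ b) ps = (joinPrefixes b ps).map (acc ++ ·) := by
  induction ps with
  | nil => intro acc b; simp [joinPrefixes]
  | cons p ps ih =>
    intro acc b
    cases ps with
    | nil => simp [joinPrefixes]
    | cons q rest =>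
      simp only [joinPrefixes, List.map_cons, List.append_assoc]
      refine congrArg₂ List.cons rfl ?_
      have := ih acc (b ++ p ++ ['.'])
      simpa [List.append_assoc] using this

theorem joinPrefixes_consHead (acc c : List Char) (h : List Char) (ts : List (List Char)) :
    joinPrefixes acc (consHead c (h :: ts)) = joinPrefixes (acc ++ c) (h :: ts) := by
  cases ts <;> simp [consHead, joinPrefixes, List.append_assoc]

theorem joinPrefixes_mySplit (cs : List Char) : ∀ (acc : List Char),
    joinPrefixes acc (mySplit cs) = (dotPrefixes cs).map (acc ++ ·) := by
  induction cs with
  | nil => intro acc; simp [mySplit, dotPrefixes, joinPrefixes]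
  | cons c rest ih =>
    intro acc
    by_cases hc : c = '.'
    · subst hc
      simp only [mySplit, dotPrefixes]
      cases hms : mySplit rest with
      | nil => exact absurd hms (mySplit_ne_nil rest)
      | cons p ps =>
        show (acc ++ []) :: joinPrefixes (acc ++ [] ++ ['.']) (p :: ps) = _
        rw [← hms]
        simp only [List.append_nil]
        rw [ih (acc ++ ['.'])]
        simp [List.map_map, Function.comp_def, List.append_assoc]
    · simp only [mySplit, dotPrefixes, if_neg hc, List.nil_append]
      cases hms : mySplit rest with
      | nil => exact absurd hms (mySplit_ne_nil rest)
      | cons p ps =>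
        rw [joinPrefixes_consHead acc [c] p ps, ← hms, ih (acc ++ [c])]
        simp [List.map_map, Function.comp_def]

theorem intercalate_cons_of_ne_nil (p : List Char) (xs : List (List Char)) (h : xs ≠ []) :
    List.intercalate ['.'] (p :: xs) = p ++ ['.'] ++ List.intercalate ['.'] xs := by
  cases xs with
  | nil => exact absurd rfl h
  | cons y ys => simp [List.intercalate, List.intersperse]

theorem range_map_join_eq_joinPrefixes (ps : List (List Char)) :
    (List.range (ps.length - 1)).map
      (fun k => PySem.Chars.join ['.'] (ps.take (k + 1))) = joinPrefixes [] ps := by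
  induction ps with
  | nil => simp [joinPrefixes]
  | cons p ps ih =>
    cases ps with
    | nil => simp [joinPrefixes]
    | cons q rest =>
      have hlen : (p :: q :: rest).length - 1 = rest.length + 1 := by simp
      rw [hlen, List.range_succ_eq_map]
      simp only [List.map_cons, List.map_map]
      have h0 : PySem.Chars.join ['.'] ((p :: q :: rest).take 1) = p := by
        simp [PySem.Chars.join, List.intercalate]
      have hstep : ∀ k : Nat,
          PySem.Chars.join ['.'] ((p :: q :: rest).take (k + 1 + 1))
            = (p ++ ['.']) ++ PySem.Chars.join ['.'] ((q :: rest).take (k + 1)) := by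
        intro k
        show PySem.Chars.join ['.'] (p :: (q :: rest).take (k + 1)) = _
        simp only [PySem.Chars.join]
        rw [intercalate_cons_of_ne_nil _ _ (by simp)]
      have hrec := ih
      have hlen2 : (q :: rest).length - 1 = rest.length := by simp
      rw [hlen2] at hrec
      simp only [joinPrefixes, h0, List.nil_append]
      refine congrArg₂ List.cons rfl ?_
      calc (List.range rest.length).map
              ((fun k => PySem.Chars.join ['.'] ((p :: q :: rest).take (k + 1))) ∘ Nat.succ)
          = (List.range rest.length).map
              (fun k => (p ++ ['.']) ++ PySem.Chars.join ['.'] ((q :: rest).take (k + 1))) := by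
            refine List.map_congr_left (fun k _ => ?_)
            simpa [Function.comp_def] using hstep k
        _ = ((List.range rest.length).map
              (fun k => PySem.Chars.join ['.'] ((q :: rest).take (k + 1)))).map ((p ++ ['.']) ++ ·) := by
            simp [List.map_map, Function.comp_def]
        _ = (joinPrefixes [] (q :: rest)).map ((p ++ ['.']) ++ ·) := by rw [hrec]
        _ = joinPrefixes (p ++ ['.']) (q :: rest) := by
            have := joinPrefixes_shift (q :: rest) (p ++ ['.']) []
            simpa using this.symm

theorem pyRange_one_n (n : Nat) :
    PySem.List.pyRange 1 (n : Int) 1 = (List.range (n - 1)).map (fun k : Nat => 1 + 1 * (k : Int)) := by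
  unfold PySem.List.pyRange
  rw [if_neg (by norm_num)]
  have hcount : (if (0:Int) < 1 then if (1:Int) < (n:Int) then (((n:Int) - 1 + 1 - 1) / 1).toNat else 0
      else if (n:Int) < 1 then ((1 - (n:Int) + -1 - 1) / -1).toNat else 0) = n - 1 := by
    rw [if_pos (by norm_num)]
    by_cases h : (1:Int) < (n:Int)
    · rw [if_pos h]; simp
    · rw [if_neg h]; omega
  simp only
  rw [hcount]

def pathExp (path : String) : List String :=
  path :: (dotPrefixes path.toList).map String.ofList

theorem foldl_append_singleton {α β : Type} (f : α → β) (l : List α) :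
    ∀ (e : List β), l.foldl (fun e x => e ++ [f x]) e = e ++ l.map f := by
  induction l with
  | nil => intro e; simp
  | cons x xs ih => intro e; simp [ih, List.append_assoc]

theorem foldl_append_blocks {α β : Type} (G : α → List β) (l : List α) :
    ∀ (e : List β), l.foldl (fun e x => e ++ G x) e = e ++ l.flatMap G := by
  induction l with
  | nil => intro e; simp
  | cons x xs ih => intro e; simp [ih, List.append_assoc]

theorem a_inner_eq (path : String) (e : List String) :
    (let parts : List String := (PySem.Str.split? path ".").getD []
     (PySem.List.pyRange 1 (parts.length : Int) 1).foldl
       (fun expanded idx =>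
         expanded ++ [PySem.Str.join "." (PySem.List.slice parts none (some idx))])
       (e ++ [path])) = e ++ pathExp path := by
  have hsplit : (PySem.Str.split? path ".").getD []
      = (mySplit path.toList).map String.ofList := by
    simp [PySem.Str.split?, PySem.Chars.split?]
    rw [splitOn_eq_mySplit]
  simp only [hsplit, foldl_append_singleton]
  have hlen : ((mySplit path.toList).map String.ofList).length = (mySplit path.toList).length := by
    simp
  rw [hlen, pyRange_one_n, List.map_map, List.append_assoc]
  refine congrArg (e ++ ·) (congrArg (path :: ·) ?_)
  have hjoin : ∀ k : Nat,
      PySem.Str.join "." (PySem.List.slice ((mySplit path.toList).map String.ofList) none (some (1 + 1 * (k : Int))))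
        = String.ofList (PySem.Chars.join ['.'] ((mySplit path.toList).take (k + 1))) := by
    intro k
    rw [PySem.List.slice_to _ (by omega)]
    have htn : ((1 : Int) + 1 * (k : Int)).toNat = k + 1 := by omega
    rw [htn, ← List.map_take]
    show String.ofList (PySem.Chars.join ".".toList (List.map String.toList (List.map String.ofList _))) = _
    simp [List.map_map, Function.comp_def]
  calc (List.range ((mySplit path.toList).length - 1)).map
          ((fun idx => PySem.Str.join "." (PySem.List.slice ((mySplit path.toList).map String.ofList) none (some idx))) ∘ (fun k : Nat => 1 + 1 * (k : Int)))
      = (List.range ((mySplit path.toList).length - 1)).map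
          (fun k => String.ofList (PySem.Chars.join ['.'] ((mySplit path.toList).take (k + 1)))) := by
        refine List.map_congr_left (fun k _ => ?_)
        simpa [Function.comp_def] using hjoin k
    _ = ((List.range ((mySplit path.toList).length - 1)).map
          (fun k => PySem.Chars.join ['.'] ((mySplit path.toList).take (k + 1)))).map String.ofList := by
        simp [List.map_map, Function.comp_def]
    _ = (joinPrefixes [] (mySplit path.toList)).map String.ofList := by
        rw [range_map_join_eq_joinPrefixes]
    _ = (dotPrefixes path.toList).map String.ofList := by
        rw [joinPrefixes_mySplit path.toList []]
        simp

theorem set_update_cons {α : Type} [BEq α] (s : PySem.Set α) (a : α) (l : List α) :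
    PySem.Set.update s (a :: l) = PySem.Set.update (PySem.Set.add s a) l := rfl

theorem b_inner_eq (cs : List Char) : ∀ (st : PySem.Set String) (pre : List Char),
    (cs.foldl (fun (p : PySem.Set String × List Char) ch =>
        if ch = '.' then (PySem.Set.add p.1 (String.ofList p.2), p.2 ++ [ch])
        else (p.1, p.2 ++ [ch])) (st, pre)).1
      = PySem.Set.update st ((dotPrefixes cs).map (fun d => String.ofList (pre ++ d))) := by
  induction cs with
  | nil => intro st pre; simp [dotPrefixes, PySem.Set.update]
  | cons c rest ih =>
    intro st pre
    by_cases hc : c = '.'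
    · subst hc
      rw [List.foldl_cons, if_pos rfl]
      rw [ih (PySem.Set.add st (String.ofList pre)) (pre ++ ['.'])]
      have hdp : dotPrefixes ('.' :: rest) = [] :: (dotPrefixes rest).map ('.' :: ·) := by
        simp [dotPrefixes]
      rw [hdp, List.map_cons, set_update_cons, List.map_map, List.append_nil]
      refine congrArg₂ PySem.Set.update rfl ?_
      simp [Function.comp_def, List.append_assoc]
    · rw [List.foldl_cons, if_neg hc]
      rw [ih st (pre ++ [c])]
      simp only [dotPrefixes, if_neg hc, List.nil_append, List.map_map]
      refine congrArg (PySem.Set.update st) ?_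
      simp [Function.comp_def, List.append_assoc]

theorem set_update_append {α : Type} [BEq α] (l1 l2 : List α) : ∀ (s : PySem.Set α),
    PySem.Set.update s (l1 ++ l2) = PySem.Set.update (PySem.Set.update s l1) l2 := by
  induction l1 with
  | nil => intro s; simp [PySem.Set.update]
  | cons a l ih => intro s; rw [List.cons_append, set_update_cons, set_update_cons, ih]

theorem foldl_update_blocks {α : Type} (F : α → List String) (l : List α) :
    ∀ (st : PySem.Set String),
    l.foldl (fun st x => PySem.Set.update st (F x)) st = PySem.Set.update st (l.flatMap F) := by
  induction l with
  | nil => intro st; simp [PySem.Set.update]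
  | cons x xs ih => intro st; simp only [List.foldl_cons, List.flatMap_cons, set_update_append, ih]

theorem a_expanded_eq (ips : List String) :
    (ips.foldl (fun expanded path =>
      let expanded := expanded ++ [path]
      let parts : List String := (PySem.Str.split? path ".").getD []
      (PySem.List.pyRange 1 (parts.length : Int) 1).foldl
        (fun expanded idx =>
          expanded ++ [PySem.Str.join "." (PySem.List.slice parts none (some idx))])
        expanded) []) = ips.flatMap pathExp := by
  rw [PySem.List.foldl_congr_mem ips _ (fun e path => e ++ pathExp path) []
    (fun e path _ => a_inner_eq path e)]
  rw [foldl_append_blocks]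
  simp

theorem b_expanded_eq (ips : List String) :
    (ips.foldl (fun expanded path =>
      let expanded := PySem.Set.add expanded path
      (path.toList.foldl (fun (p : PySem.Set String × List Char) ch =>
          if ch = '.' then (PySem.Set.add p.1 (String.ofList p.2), p.2 ++ [ch])
          else (p.1, p.2 ++ [ch]))
        (expanded, [])).1) PySem.Set.empty) = PySem.Set.ofList (ips.flatMap pathExp) := by
  have hbody : ∀ (st : PySem.Set String) (path : String),
      (path.toList.foldl (fun (p : PySem.Set String × List Char) ch =>
          if ch = '.' then (PySem.Set.add p.1 (String.ofList p.2), p.2 ++ [ch])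
          else (p.1, p.2 ++ [ch])) (PySem.Set.add st path, [])).1
        = PySem.Set.update st (pathExp path) := by
    intro st path
    rw [b_inner_eq path.toList (PySem.Set.add st path) []]
    rw [pathExp, set_update_cons]
    simp
  rw [PySem.List.foldl_congr_mem ips _ (fun st path => PySem.Set.update st (pathExp path))
    PySem.Set.empty (fun st path _ => hbody st path)]
  rw [foldl_update_blocks]
  rw [PySem.Set.ofList_eq_foldl]
  rfl


-- ===== VERDICT (by name: the statement is the Claim_ definition above) =====
theorem expand_import_paths_py_spec : Claim_equal_expand_import_paths_py := by
  intro ips _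
  unfold Spec_expand_import_paths_py expand_import_paths_py expand_import_paths_py_alt
  simp only
  rw [a_expanded_eq, b_expanded_eq]
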